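-- pv_equiv track=rewrite | github.com/L-ilac/coding_test | wootak96/백준 8주차/16234.py | bfs
-- ===== SOURCE A (Python) =====
-- from collections import deque
--
-- dx = [0,0,1,-1]
--
-- dy = [1,-1,0,0]
--
-- def bfs(a, l, r):
--     n = len(a)
--     c = [[False]*n for _ in range(n)]
--     ok = False
--     for i in range(n):
--         for j in range(n):
--             if c[i][j] == False:
--                 q = deque()
--                 q.append((i,j))
--                 c[i][j] = True
--                 s = [(i,j)]
--                 total = a[i][j]
--                 while q:
--                     x, y = q.popleft()
--                     for k in range(4):
--                         nx,ny = x+dx[k], y+dy[k]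
--                         if 0 <= nx < n and 0 <= ny < n and c[nx][ny] == False:
--                             diff = abs(a[nx][ny] - a[x][y])
--                             if l <= diff <= r:
--                                 q.append((nx,ny))
--                                 s.append((nx,ny))
--                                 c[nx][ny] = True
--                                 ok = True
--                                 total += a[nx][ny]
--                 val = total // len(s)
--                 for x, y in s:
--                     a[x][y] = val
--     return ok
-- ===== SOURCE B (Python) =====
-- # Union-find re-implementation. Computes all qualifying edges from the original
-- # values, builds the whole partition, then writes each group's floor-average back
-- # into a (same in-place mutation as A); returns True iff any qualifying adjacent
-- # pair exists (which is exactly when A merged any cell into a group).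
-- def bfs(a, l, r):
--     n = len(a)
--     found = False
--     edges = []
--     for i in range(n):
--         for j in range(n):
--             for (x, y) in ((i, j + 1), (i + 1, j)):
--                 if x < n and y < n and l <= abs(a[i][j] - a[x][y]) <= r:
--                     found = True
--                     edges.append((i * n + j, x * n + y))
--     parent = list(range(n * n))
--
--     def find(u):
--         while parent[u] != u:
--             parent[u] = parent[parent[u]]
--             u = parent[u]
--         return u
--
--     for u, v in edges:
--         ru, rv = find(u), find(v)
--         if ru != rv:
--             parent[ru] = rv
--     sums = {}
--     counts = {}
--     for i in range(n):
--         for j in range(n):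
--             root = find(i * n + j)
--             sums[root] = sums.get(root, 0) + a[i][j]
--             counts[root] = counts.get(root, 0) + 1
--     for i in range(n):
--         for j in range(n):
--             a[i][j] = sums[find(i * n + j)] // counts[find(i * n + j)]
--     return found
-- ===== Notes on version B (the rewrite author's own statement) =====
-- stated objective: alternative
-- what changed: Replaces A's repeated BFS flood-fill (deque + visited matrix, averaging each component as it is found) by a single scan collecting all qualifying right/down edges from the original values, a union-find that builds the whole partition at once, and one final pass writing each group's floor-average back; the returned flag becomes 'some qualifying adjacent pair exists'.
import Mathlib
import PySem

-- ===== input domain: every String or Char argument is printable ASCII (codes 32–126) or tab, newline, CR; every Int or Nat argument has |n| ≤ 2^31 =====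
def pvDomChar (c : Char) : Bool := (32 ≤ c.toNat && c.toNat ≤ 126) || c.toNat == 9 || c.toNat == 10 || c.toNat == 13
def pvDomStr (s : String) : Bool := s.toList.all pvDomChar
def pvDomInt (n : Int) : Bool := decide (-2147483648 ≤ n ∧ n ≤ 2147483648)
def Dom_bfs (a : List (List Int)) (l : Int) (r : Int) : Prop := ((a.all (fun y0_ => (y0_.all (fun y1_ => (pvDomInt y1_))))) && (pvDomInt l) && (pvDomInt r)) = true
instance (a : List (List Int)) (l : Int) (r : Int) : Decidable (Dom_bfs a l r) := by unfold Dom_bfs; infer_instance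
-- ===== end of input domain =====

-- B replaces A's repeated BFS flood-fill by one edge scan + union-find partition; both Pythons
-- also mutate `a` in place (identically); the theorems below are about the returned Bool only.

-- ===== PORT A =====
-- A's in-place writes a[x][y] = val touch only cells already marked visited, which the ok
-- computation never reads again, and s/total/val feed only those writes; a pure Bool-returning
-- port has no counterpart for the mutation, so the ok computation is transliterated exactly
-- and the write-only variables s/total/val are dropped.
def pvDx : List Int := [0, 0, 1, -1]
def pvDy : List Int := [1, -1, 0, 0]
-- a[x][y] for coordinates already checked to satisfy 0 <= x,y < n
def pvGet (a : List (List Int)) (x y : Int) : Int := (a.getD x.toNat []).getD y.toNat 0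
def pvCGet (c : List (List Bool)) (x y : Int) : Bool := (c.getD x.toNat []).getD y.toNat false
def pvCSet (c : List (List Bool)) (x y : Int) : List (List Bool) :=
  c.set x.toNat ((c.getD x.toNat []).set y.toNat true)

-- one direction k of A's `for k in range(4)` inner scan
def pvStep (a : List (List Int)) (l r : Int) (n : Int) (x y : Int)
    (st : List (Int × Int) × List (List Bool) × Bool) (k : Nat) :
    List (Int × Int) × List (List Bool) × Bool :=
  let nx := x + pvDx.getD k 0
  let ny := y + pvDy.getD k 0
  if 0 ≤ nx ∧ nx < n ∧ 0 ≤ ny ∧ ny < n ∧ pvCGet st.2.1 nx ny = false then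
    let diff := |pvGet a nx ny - pvGet a x y|
    if l ≤ diff ∧ diff ≤ r then (st.1 ++ [(nx, ny)], pvCSet st.2.1 nx ny, true)
    else st
  else st

-- A's `while q:` loop; fuel n*n bounds the number of pops (each pop matches one enqueue,
-- and at most n*n cells are ever enqueued in one round)
def pvLoop (a : List (List Int)) (l r : Int) (n : Int) :
    Nat → List (Int × Int) → List (List Bool) → Bool → List (List Bool) × Bool
  | _, [], c, ok => (c, ok)
  | 0, _ :: _, c, ok => (c, ok)
  | fuel + 1, (x, y) :: qt, c, ok =>
    let st := (List.range 4).foldl (pvStep a l r n x y) (qt, c, ok)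
    pvLoop a l r n fuel st.1 st.2.1 st.2.2

def bfs (a : List (List Int)) (l : Int) (r : Int) : Bool :=
  let n := a.length
  let c0 : List (List Bool) := List.replicate n (List.replicate n false)
  let res := (List.range n).foldl (fun st (i : Nat) =>
    (List.range n).foldl (fun st (j : Nat) =>
      if pvCGet st.1 (i : Int) (j : Int) = false then
        pvLoop a l r (n : Int) (n * n) [((i : Int), (j : Int))]
          (pvCSet st.1 (i : Int) (j : Int)) st.2
      else st) st) (c0, false)
  res.2

-- ===== PORT B =====
-- B's union-find / sums / averaging part performs only the in-place writes and never touches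
-- `found`; a pure Bool-returning port carries only the `found` computation, transliterated exactly.
def pvEdgeStep (a : List (List Int)) (l r : Int) (n : Nat) (i j : Nat)
    (found : Bool) (p : Nat × Nat) : Bool :=
  if p.1 < n ∧ p.2 < n ∧
      l ≤ |pvGet a (i : Int) (j : Int) - pvGet a (p.1 : Int) (p.2 : Int)| ∧
      |pvGet a (i : Int) (j : Int) - pvGet a (p.1 : Int) (p.2 : Int)| ≤ r then true
  else found

def bfs_alt (a : List (List Int)) (l : Int) (r : Int) : Bool :=
  let n := a.length
  (List.range n).foldl (fun found (i : Nat) =>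
    (List.range n).foldl (fun found (j : Nat) =>
      [(i, j + 1), (i + 1, j)].foldl (pvEdgeStep a l r n i j) found) found) false

-- ===== PRECONDITION & SPEC =====
-- Pre_ excludes exactly the inputs on which A raises IndexError: some row shorter than len(a).
def Pre_bfs (a : List (List Int)) (l : Int) (r : Int) : Prop :=
  ∀ row ∈ a, a.length ≤ row.length
instance (a : List (List Int)) (l : Int) (r : Int) : Decidable (Pre_bfs a l r) := by
  unfold Pre_bfs; infer_instance
def pvWitness_bfs : List (List Int) × Int × Int := ([[1, 3], [6, 2]], 1, 3)

def Spec_bfs (a : List (List Int)) (l : Int) (r : Int) (out : Bool) : Prop := out = bfs_alt a l r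
instance (a : List (List Int)) (l : Int) (r : Int) (out : Bool) : Decidable (Spec_bfs a l r out) := by
  unfold Spec_bfs; infer_instance

-- ===== CLAIM (what is proved, stated in full; the proofs are below) =====
def Claim_equal_bfs : Prop := ∀ (a : List (List Int)) (l : Int) (r : Int),
  Dom_bfs a l r → Pre_bfs a l r → Spec_bfs a l r (bfs a l r)

-- ===== LEMMAS AND PROOFS =====

-- abbreviations used only by the proofs
def pvInR (n x : Int) : Prop := 0 ≤ x ∧ x < n
def pvQual (a : List (List Int)) (l r x y u v : Int) : Prop :=
  l ≤ |pvGet a u v - pvGet a x y| ∧ |pvGet a u v - pvGet a x y| ≤ r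
-- "some qualifying adjacent in-range pair exists"
def pvHasE (a : List (List Int)) (l r : Int) : Prop :=
  ∃ x y : Int, ∃ k : Nat, k < 4 ∧
    pvInR (a.length : Int) x ∧ pvInR (a.length : Int) y ∧
    pvInR (a.length : Int) (x + pvDx.getD k 0) ∧ pvInR (a.length : Int) (y + pvDy.getD k 0) ∧
    pvQual a l r x y (x + pvDx.getD k 0) (y + pvDy.getD k 0)

def pvShape (n : Nat) (c : List (List Bool)) : Prop :=
  c.length = n ∧ ∀ row ∈ c, row.length = n

-- generic fold helpers ------------------------------------------------------
theorem pv_foldl_pres_mem {α β : Type} {L : List β} {f : α → β → α} {P : α → Prop}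
    (h : ∀ s x, x ∈ L → P s → P (f s x)) : ∀ {s}, P s → P (L.foldl f s) := by
  induction L with
  | nil => intro s hs; exact hs
  | cons x t ih =>
    intro s hs
    exact ih (fun s y hy => h s y (List.mem_cons_of_mem _ hy)) (h s x (List.mem_cons_self) hs)

theorem pv_foldl_inv_mem {α β : Type} {L : List β} {f : α → β → α}
    {P : α → Prop} {V : α → β → Prop}
    (h : ∀ s x, x ∈ L → P s → P (f s x) ∧ V (f s x) x ∧ (∀ y, V s y → V (f s x) y)) :
    ∀ {s}, P s → P (L.foldl f s) ∧ (∀ x ∈ L, V (L.foldl f s) x) ∧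
      (∀ y, V s y → V (L.foldl f s) y) := by
  induction L with
  | nil => intro s hs; exact ⟨hs, by simp, fun y hy => hy⟩
  | cons x t ih =>
    intro s hs
    have hx := h s x (List.mem_cons_self) hs
    have ht := ih (fun s y hy hs => h s y (List.mem_cons_of_mem _ hy) hs) hx.1
    refine ⟨ht.1, ?_, fun y hy => ht.2.2 y (hx.2.2 y hy)⟩
    intro y hy
    rcases List.mem_cons.1 hy with rfl | hy
    · exact ht.2.2 y hx.2.1
    · exact ht.2.1 y hy

theorem pv_foldl_flat {α : Type} (g : α → Nat → Nat → α) (n m : Nat) (s : α) :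
    (List.range n).foldl (fun st i => (List.range m).foldl (fun st j => g st i j) st) s =
      ((List.range n).flatMap (fun i => (List.range m).map (fun j => (i, j)))).foldl
        (fun st p => g st p.1 p.2) s := by
  suffices h : ∀ (L : List Nat) (s : α),
      L.foldl (fun st i => (List.range m).foldl (fun st j => g st i j) st) s =
        (L.flatMap (fun i => (List.range m).map (fun j => (i, j)))).foldl
          (fun st p => g st p.1 p.2) s from h (List.range n) s
  intro L
  induction L with
  | nil => intro s; rfl
  | cons x t ih =>
    intro s
    simp only [List.flatMap_cons, List.foldl_append, List.foldl_cons, List.foldl_map]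
    rw [ih]

theorem pv_foldl_or_any {β : Type} (g : β → Bool) (L : List β) (b : Bool) :
    L.foldl (fun b x => b || g x) b = (b || L.any g) := by
  induction L generalizing b with
  | nil => simp
  | cons x t ih => simp [ih, Bool.or_assoc]

-- the flat cell list and the two folded step functions ----------------------
def pvCells (n : Nat) : List (Nat × Nat) :=
  (List.range n).flatMap (fun i => (List.range n).map (fun j => (i, j)))

theorem pv_mem_cells {n : Nat} {p : Nat × Nat} : p ∈ pvCells n ↔ p.1 < n ∧ p.2 < n := by
  cases p with
  | mk i j => simp [pvCells, List.mem_flatMap, List.mem_map, List.mem_range]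

def pvOutStep (a : List (List Int)) (l r : Int) (st : List (List Bool) × Bool)
    (p : Nat × Nat) : List (List Bool) × Bool :=
  if pvCGet st.1 (p.1 : Int) (p.2 : Int) = false then
    pvLoop a l r (a.length : Int) (a.length * a.length) [((p.1 : Int), (p.2 : Int))]
      (pvCSet st.1 (p.1 : Int) (p.2 : Int)) st.2
  else st

theorem pv_bfs_flat (a : List (List Int)) (l r : Int) :
    bfs a l r = ((pvCells a.length).foldl (pvOutStep a l r)
      (List.replicate a.length (List.replicate a.length false), false)).2 := by
  unfold bfs pvCells pvOutStep
  dsimp only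
  rw [pv_foldl_flat (fun st i j =>
    if pvCGet st.1 (i : Int) (j : Int) = false then
      pvLoop a l r (a.length : Int) (a.length * a.length) [((i : Int), (j : Int))]
        (pvCSet st.1 (i : Int) (j : Int)) st.2
    else st)]

theorem pv_bfs_alt_flat (a : List (List Int)) (l r : Int) :
    bfs_alt a l r = (pvCells a.length).foldl
      (fun found p => [(p.1, p.2 + 1), (p.1 + 1, p.2)].foldl
        (pvEdgeStep a l r a.length p.1 p.2) found) false := by
  unfold bfs_alt pvCells
  dsimp only
  rw [pv_foldl_flat (fun found i j => [(i, j + 1), (i + 1, j)].foldl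
    (pvEdgeStep a l r a.length i j) found)]

-- c-matrix lemmas -----------------------------------------------------------
theorem pv_shape_c0 (n : Nat) : pvShape n (List.replicate n (List.replicate n false)) := by
  constructor
  · simp
  · intro row hrow
    simp_all [List.eq_of_mem_replicate hrow]

theorem pv_cget_c0 (n : Nat) (x y : Int) :
    pvCGet (List.replicate n (List.replicate n false)) x y = false := by
  unfold pvCGet
  simp only [List.getD_eq_getElem?_getD, List.getElem?_replicate]
  split <;> simp

theorem pv_shape_cset {n : Nat} {c : List (List Bool)} (h : pvShape n c) (x y : Int) :
    pvShape n (pvCSet c x y) := by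
  obtain ⟨hlen, hrow⟩ := h
  by_cases hx : x.toNat < c.length
  · refine ⟨by simp [pvCSet, hlen], ?_⟩
    intro row hr
    rcases List.mem_or_eq_of_mem_set hr with hr | rfl
    · exact hrow _ hr
    · rw [List.getD_eq_getElem?_getD, List.getElem?_eq_getElem hx]
      simp [hrow _ (List.getElem_mem hx)]
  · unfold pvCSet
    rw [List.set_eq_of_length_le (by omega)]
    exact ⟨hlen, hrow⟩

theorem pv_cget_cset_self {n : Nat} {c : List (List Bool)} (h : pvShape n c)
    {x y : Int} (hx : pvInR (n : Int) x) (hy : pvInR (n : Int) y) :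
    pvCGet (pvCSet c x y) x y = true := by
  obtain ⟨hlen, hrow⟩ := h
  obtain ⟨hx1, hx2⟩ := hx
  obtain ⟨hy1, hy2⟩ := hy
  have hxl : x.toNat < c.length := by rw [hlen]; omega
  have hyl : y.toNat < ((c.getD x.toNat []).set y.toNat true).length := by
    rw [List.length_set, List.getD_eq_getElem?_getD, List.getElem?_eq_getElem hxl]
    have := hrow _ (List.getElem_mem hxl)
    simp [this]
    omega
  simp only [pvCGet, pvCSet, List.getD_eq_getElem?_getD]
  rw [List.getElem?_set_self hxl]
  simp only [Option.getD_some]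
  rw [List.getElem?_eq_getElem (by simpa using hyl)]
  simp only [List.getD_eq_getElem?_getD] at hyl ⊢
  rw [List.getElem_set_self]
  rfl

theorem pv_cget_cset_ne {n : Nat} {c : List (List Bool)} (h : pvShape n c)
    {x y u v : Int} (hx : 0 ≤ x) (hy : 0 ≤ y) (hu : 0 ≤ u) (hv : 0 ≤ v)
    (hne : (u, v) ≠ (x, y)) :
    pvCGet (pvCSet c x y) u v = pvCGet c u v := by
  simp only [pvCGet, pvCSet, List.getD_eq_getElem?_getD]
  by_cases hxu : x.toNat = u.toNat
  · have hxu' : x = u := by omega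
    have hyv : y.toNat ≠ v.toNat := by
      have : y ≠ v := by rintro rfl; exact hne (by rw [hxu'])
      omega
    subst hxu'
    by_cases hxl : x.toNat < c.length
    · rw [List.getElem?_set_self hxl]
      simp only [Option.getD_some]
      rw [List.getElem?_set_ne (by omega)]
    · rw [List.set_eq_of_length_le (by omega)]
  · rw [List.getElem?_set_ne hxu]

theorem pv_cget_cset_mono {n : Nat} {c : List (List Bool)} (h : pvShape n c)
    {x y u v : Int} (hx : pvInR (n : Int) x) (hy : pvInR (n : Int) y)
    (hu : 0 ≤ u) (hv : 0 ≤ v)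
    (ht : pvCGet c u v = true) : pvCGet (pvCSet c x y) u v = true := by
  by_cases hne : (u, v) = (x, y)
  · obtain ⟨h1, h2⟩ := Prod.mk.injEq .. ▸ hne
    subst h1; subst h2; exact pv_cget_cset_self h hx hy
  · rw [pv_cget_cset_ne h hx.1 hy.1 hu hv hne]; exact ht

-- direction facts -----------------------------------------------------------
theorem pv_dir_ne_zero : ∀ k < 4, (pvDx.getD k 0, pvDy.getD k 0) ≠ (0, 0) := by decide
theorem pv_dir_sym : ∀ k < 4, ∃ k' < 4,
    pvDx.getD k' 0 = -pvDx.getD k 0 ∧ pvDy.getD k' 0 = -pvDy.getD k 0 := by decide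

theorem pv_qual_symm {a : List (List Int)} {l r x y u v : Int} :
    pvQual a l r x y u v ↔ pvQual a l r u v x y := by
  unfold pvQual; rw [abs_sub_comm]

-- ok-monotonicity ------------------------------------------------------------
theorem pv_step_ok_mono {a : List (List Int)} {l r n x y : Int} {st} {k : Nat}
    (h : st.2.2 = true) : (pvStep a l r n x y st k).2.2 = true := by
  unfold pvStep; dsimp only; split_ifs <;> simp_all

theorem pv_loop_ok_mono (a : List (List Int)) (l r n : Int) :
    ∀ (fuel : Nat) (q : List (Int × Int)) (c : List (List Bool)),
      (pvLoop a l r n fuel q c true).2 = true := by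
  intro fuel
  induction fuel with
  | zero => intro q c; cases q <;> rfl
  | succ f ih =>
    intro q c
    match q with
    | [] => rfl
    | (x, y) :: qt =>
      have hst : ((List.range 4).foldl (pvStep a l r n x y) (qt, c, true)).2.2 = true :=
        pv_foldl_pres_mem (P := fun (st : List (Int × Int) × List (List Bool) × Bool) => st.2.2 = true)
          (fun s k _ hs => pv_step_ok_mono hs) rfl
      show (pvLoop a l r n f _ _ _).2 = true
      rw [hst]
      exact ih _ _

-- shape preservation through the loop ----------------------------------------
theorem pv_step_shape {a : List (List Int)} {l r n x y : Int} {st} {k : Nat}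
    (h : pvShape a.length st.2.1) : pvShape a.length (pvStep a l r n x y st k).2.1 := by
  unfold pvStep; dsimp only; split_ifs with h1 h2
  · exact pv_shape_cset h _ _
  · exact h
  · exact h

theorem pv_loop_shape (a : List (List Int)) (l r n : Int) :
    ∀ (fuel : Nat) (q : List (Int × Int)) (c : List (List Bool)) (ok : Bool),
      pvShape a.length c → pvShape a.length (pvLoop a l r n fuel q c ok).1 := by
  intro fuel
  induction fuel with
  | zero => intro q c ok h; cases q <;> exact h
  | succ f ih =>
    intro q c ok h
    match q with
    | [] => exact h
    | (x, y) :: qt =>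
      have hst : pvShape a.length
          (((List.range 4).foldl (pvStep a l r n x y) (qt, c, ok)).2.1) :=
        pv_foldl_pres_mem (P := fun (st : List (Int × Int) × List (List Bool) × Bool) => pvShape a.length st.2.1)
          (fun s k _ hs => pv_step_shape hs) h
      exact ih _ _ _ hst

-- soundness ------------------------------------------------------------------
def pvSound (a : List (List Int)) (l r : Int)
    (st : List (Int × Int) × List (List Bool) × Bool) : Prop :=
  (∀ p ∈ st.1, pvInR (a.length : Int) p.1 ∧ pvInR (a.length : Int) p.2) ∧
    (st.2.2 = true → pvHasE a l r)

theorem pv_step_sound {a : List (List Int)} {l r x y : Int} {st} {k : Nat} (hk : k < 4)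
    (hx : pvInR (a.length : Int) x) (hy : pvInR (a.length : Int) y)
    (h : pvSound a l r st) : pvSound a l r (pvStep a l r (a.length : Int) x y st k) := by
  obtain ⟨hq, hok⟩ := h
  unfold pvStep; dsimp only; split_ifs with h1 h2
  · refine ⟨?_, ?_⟩
    · intro p hp
      rcases List.mem_append.1 hp with hp | hp
      · exact hq p hp
      · rcases List.mem_singleton.1 hp with rfl
        exact ⟨⟨h1.1, h1.2.1⟩, ⟨h1.2.2.1, h1.2.2.2.1⟩⟩
    · intro _
      exact ⟨x, y, k, hk, hx, hy, ⟨h1.1, h1.2.1⟩, ⟨h1.2.2.1, h1.2.2.2.1⟩, h2⟩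
  · exact ⟨hq, hok⟩
  · exact ⟨hq, hok⟩

theorem pv_loop_sound {a : List (List Int)} {l r : Int} :
    ∀ (fuel : Nat) (q : List (Int × Int)) (c : List (List Bool)) (ok : Bool),
      pvSound a l r (q, c, ok) →
      (pvLoop a l r (a.length : Int) fuel q c ok).2 = true → pvHasE a l r := by
  intro fuel
  induction fuel with
  | zero =>
    intro q c ok h
    cases q with
    | nil => exact h.2
    | cons p t => exact h.2
  | succ f ih =>
    intro q c ok h
    match q with
    | [] => exact h.2
    | (x, y) :: qt =>
      have hx := (h.1 (x, y) (List.mem_cons_self)).1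
      have hy := (h.1 (x, y) (List.mem_cons_self)).2
      have hqt : pvSound a l r (qt, c, ok) :=
        ⟨fun p hp => h.1 p (List.mem_cons_of_mem _ hp), h.2⟩
      have hst : pvSound a l r ((List.range 4).foldl
          (pvStep a l r (a.length : Int) x y) (qt, c, ok)) :=
        pv_foldl_pres_mem (P := pvSound a l r)
          (fun s k hk hs => pv_step_sound (List.mem_range.1 hk) hx hy hs) hqt
      exact ih _ _ _ hst

-- completeness ---------------------------------------------------------------
theorem pv_step_false {a : List (List Int)} {l r x y : Int} {st} {k : Nat}
    (h : (pvStep a l r (a.length : Int) x y st k).2.2 = false) :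
    pvStep a l r (a.length : Int) x y st k = st ∧
      (pvInR (a.length : Int) (x + pvDx.getD k 0) → pvInR (a.length : Int) (y + pvDy.getD k 0) →
        pvCGet st.2.1 (x + pvDx.getD k 0) (y + pvDy.getD k 0) = false →
        ¬ pvQual a l r x y (x + pvDx.getD k 0) (y + pvDy.getD k 0)) := by
  by_cases h1 : (0 ≤ x + pvDx.getD k 0 ∧ x + pvDx.getD k 0 < (a.length : Int) ∧
      0 ≤ y + pvDy.getD k 0 ∧ y + pvDy.getD k 0 < (a.length : Int) ∧
      pvCGet st.2.1 (x + pvDx.getD k 0) (y + pvDy.getD k 0) = false)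
  · by_cases h2 : (l ≤ |pvGet a (x + pvDx.getD k 0) (y + pvDy.getD k 0) - pvGet a x y| ∧
        |pvGet a (x + pvDx.getD k 0) (y + pvDy.getD k 0) - pvGet a x y| ≤ r)
    · exfalso
      have e : (pvStep a l r (a.length : Int) x y st k).2.2 = true := by
        unfold pvStep; dsimp only; rw [if_pos h1, if_pos h2]
      rw [e] at h
      simp at h
    · have e : pvStep a l r (a.length : Int) x y st k = st := by
        unfold pvStep; dsimp only; rw [if_pos h1, if_neg h2]
      exact ⟨e, fun _ _ _ hq => h2 hq⟩
  · have e : pvStep a l r (a.length : Int) x y st k = st := by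
      unfold pvStep; dsimp only; rw [if_neg h1]
    exact ⟨e, fun hnx hny hcg => absurd ⟨hnx.1, hnx.2, hny.1, hny.2, hcg⟩ h1⟩

theorem pv_fold4_false {a : List (List Int)} {l r x y : Int} {st}
    (h : ((List.range 4).foldl (pvStep a l r (a.length : Int) x y) st).2.2 = false) :
    (List.range 4).foldl (pvStep a l r (a.length : Int) x y) st = st ∧
      ∀ k < 4, (pvInR (a.length : Int) (x + pvDx.getD k 0) → pvInR (a.length : Int) (y + pvDy.getD k 0) →
        pvCGet st.2.1 (x + pvDx.getD k 0) (y + pvDy.getD k 0) = false →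
        ¬ pvQual a l r x y (x + pvDx.getD k 0) (y + pvDy.getD k 0)) := by
  have hL : (List.range 4) = [0, 1, 2, 3] := rfl
  rw [hL] at h ⊢
  simp only [List.foldl_cons, List.foldl_nil] at h ⊢
  have h3 := pv_step_false h
  rw [h3.1] at h
  have h2 := pv_step_false h
  rw [h2.1] at h
  have h1 := pv_step_false h
  rw [h1.1] at h
  have h0 := pv_step_false h
  rw [h2.1, h1.1, h0.1] at h3
  rw [h1.1, h0.1] at h2
  rw [h0.1] at h1
  refine ⟨by rw [h0.1, h1.1, h2.1, h3.1], ?_⟩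
  intro k hk
  interval_cases k
  · exact h0.2
  · exact h1.2
  · exact h2.2
  · exact h3.2

theorem pv_loop_false {a : List (List Int)} {l r x y : Int} {c : List (List Bool)}
    {fuel : Nat} (hf : 1 ≤ fuel)
    (h : (pvLoop a l r (a.length : Int) fuel [(x, y)] c false).2 = false) :
    (pvLoop a l r (a.length : Int) fuel [(x, y)] c false).1 = c ∧
      ∀ k < 4, (pvInR (a.length : Int) (x + pvDx.getD k 0) → pvInR (a.length : Int) (y + pvDy.getD k 0) →
        pvCGet c (x + pvDx.getD k 0) (y + pvDy.getD k 0) = false →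
        ¬ pvQual a l r x y (x + pvDx.getD k 0) (y + pvDy.getD k 0)) := by
  match fuel, hf with
  | f + 1, _ =>
    have hunf : pvLoop a l r (a.length : Int) (f + 1) [(x, y)] c false =
        pvLoop a l r (a.length : Int) f
          (((List.range 4).foldl (pvStep a l r (a.length : Int) x y) ([], c, false)).1)
          (((List.range 4).foldl (pvStep a l r (a.length : Int) x y) ([], c, false)).2.1)
          (((List.range 4).foldl (pvStep a l r (a.length : Int) x y) ([], c, false)).2.2) := rfl
    rw [hunf] at h ⊢
    cases hok : ((List.range 4).foldl (pvStep a l r (a.length : Int) x y) ([], c, false)).2.2 with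
    | true =>
      rw [hok] at h
      rw [pv_loop_ok_mono] at h
      exact absurd h (by simp)
    | false =>
      have hf4 := pv_fold4_false hok
      rw [hf4.1] at h ⊢
      have hnil : pvLoop a l r (a.length : Int) f [] c false = (c, false) := by
        cases f <;> rfl
      rw [hnil]
      exact ⟨rfl, hf4.2⟩

def pvOInv (a : List (List Int)) (l r : Int) (c : List (List Bool)) : Prop :=
  ∀ x y : Int, pvInR (a.length : Int) x → pvInR (a.length : Int) y → pvCGet c x y = true →
    ∀ k < 4, pvInR (a.length : Int) (x + pvDx.getD k 0) → pvInR (a.length : Int) (y + pvDy.getD k 0) →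
      ¬ pvQual a l r x y (x + pvDx.getD k 0) (y + pvDy.getD k 0)

-- main characterizations ----------------------------------------------------
theorem pv_bfs_true (a : List (List Int)) (l r : Int) :
    bfs a l r = true ↔ pvHasE a l r := by
  rw [pv_bfs_flat]
  constructor
  · -- soundness: the flag flips only when a qualifying in-range pair is found
    intro h
    have hP := pv_foldl_pres_mem
      (L := pvCells a.length) (f := pvOutStep a l r)
      (P := fun (st : List (List Bool) × Bool) =>
        pvShape a.length st.1 ∧ (st.2 = true → pvHasE a l r))
      ?_ (s := (List.replicate a.length (List.replicate a.length false), false))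
      ⟨pv_shape_c0 _, by simp⟩
    · exact hP.2 h
    · intro s p hp hPs
      obtain ⟨hi, hj⟩ := pv_mem_cells.1 hp
      unfold pvOutStep; split_ifs with hv
      · refine ⟨pv_loop_shape _ _ _ _ _ _ _ _ (pv_shape_cset hPs.1 _ _), ?_⟩
        intro ht
        refine pv_loop_sound _ _ _ _ ?_ ht
        unfold pvSound
        refine ⟨?_, hPs.2⟩
        intro q hq
        rcases List.mem_singleton.1 hq with rfl
        dsimp only
        exact ⟨⟨Int.natCast_nonneg _, by exact_mod_cast hi⟩,
          ⟨Int.natCast_nonneg _, by exact_mod_cast hj⟩⟩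
      · exact hPs

  · -- completeness: if the flag stays false, no qualifying pair can exist
    intro hE
    by_contra hne
    have hfalse : ((pvCells a.length).foldl (pvOutStep a l r)
        (List.replicate a.length (List.replicate a.length false), false)).2 = false := by
      cases hfold : ((pvCells a.length).foldl (pvOutStep a l r)
          (List.replicate a.length (List.replicate a.length false), false)).2
      · rfl
      · exact absurd hfold hne
    have H := pv_foldl_inv_mem
      (L := pvCells a.length) (f := pvOutStep a l r)
      (P := fun (st : List (List Bool) × Bool) =>
        pvShape a.length st.1 ∧ (st.2 = false → pvOInv a l r st.1))
      (V := fun (st : List (List Bool) × Bool) (p : Nat × Nat) =>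
        st.2 = false → pvCGet st.1 (p.1 : Int) (p.2 : Int) = true)
      ?_ (s := (List.replicate a.length (List.replicate a.length false), false))
      ⟨pv_shape_c0 _, ?_⟩
    · obtain ⟨x, y, k, hk, hx, hy, hkx, hky, hq⟩ := hE
      have hOI : pvOInv a l r ((pvCells a.length).foldl (pvOutStep a l r)
          (List.replicate a.length (List.replicate a.length false), false)).1 :=
        H.1.2 hfalse
      obtain ⟨hx1, hx2⟩ := hx
      obtain ⟨hy1, hy2⟩ := hy
      have hp : (x.toNat, y.toNat) ∈ pvCells a.length :=
        pv_mem_cells.2 ⟨by omega, by omega⟩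
      have hvp := H.2.1 _ hp hfalse
      have ex : ((x.toNat : Nat) : Int) = x := by omega
      have ey : ((y.toNat : Nat) : Int) = y := by omega
      rw [ex, ey] at hvp
      exact hOI x y ⟨hx1, hx2⟩ ⟨hy1, hy2⟩ hvp k hk hkx hky hq
    · -- the preservation step
      intro s p hp hPs
      obtain ⟨hi, hj⟩ := pv_mem_cells.1 hp
      have hpx : pvInR (a.length : Int) (p.1 : Int) :=
        ⟨Int.natCast_nonneg _, by exact_mod_cast hi⟩
      have hpy : pvInR (a.length : Int) (p.2 : Int) :=
        ⟨Int.natCast_nonneg _, by exact_mod_cast hj⟩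
      unfold pvOutStep; split_ifs with hv
      all_goals beta_reduce
      · -- seed round
        have hshape1 : pvShape a.length (pvCSet s.1 (p.1 : Int) (p.2 : Int)) :=
          pv_shape_cset hPs.1 _ _
        cases hs2 : s.2 with
        | true =>
          have hres := pv_loop_ok_mono a l r (a.length : Int) (a.length * a.length)
            [((p.1 : Int), (p.2 : Int))] (pvCSet s.1 (p.1 : Int) (p.2 : Int))
          refine ⟨⟨pv_loop_shape _ _ _ _ _ _ _ _ hshape1, fun hf => ?_⟩,
            fun hf => ?_, fun z hz hf => ?_⟩ <;>
            · rw [hres] at hf; cases hf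
        | false =>
          cases hres : (pvLoop a l r (a.length : Int) (a.length * a.length)
              [((p.1 : Int), (p.2 : Int))] (pvCSet s.1 (p.1 : Int) (p.2 : Int)) false).2 with
          | true =>
            refine ⟨⟨pv_loop_shape _ _ _ _ _ _ _ _ hshape1, fun hf => ?_⟩,
              fun hf => ?_, fun z hz hf => ?_⟩ <;> cases hf
          | false =>
            have hnpos : 0 < a.length := Nat.lt_of_le_of_lt (Nat.zero_le _) hi
            have hfuel : 1 ≤ a.length * a.length := Nat.mul_pos hnpos hnpos
            have hlf := pv_loop_false (x := (p.1 : Int)) (y := (p.2 : Int)) hfuel hres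
            have hOs : pvOInv a l r s.1 := hPs.2 hs2
            refine ⟨⟨by rw [hlf.1]; exact hshape1, fun _ => ?_⟩,
              fun _ => ?_, fun z hz hf => ?_⟩
            · -- the invariant extends to the freshly marked seed
              rw [hlf.1]
              intro x y hx hy hvis k hk hkx hky
              by_cases hxy : x = (p.1 : Int) ∧ y = (p.2 : Int)
              · obtain ⟨rfl, rfl⟩ := hxy
                by_cases hcg : pvCGet (pvCSet s.1 (p.1 : Int) (p.2 : Int))
                    ((p.1 : Int) + pvDx.getD k 0) ((p.2 : Int) + pvDy.getD k 0) = false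
                · exact hlf.2 k hk hkx hky hcg
                · have hcgt : pvCGet (pvCSet s.1 (p.1 : Int) (p.2 : Int))
                      ((p.1 : Int) + pvDx.getD k 0) ((p.2 : Int) + pvDy.getD k 0) = true := by
                    cases hc : pvCGet (pvCSet s.1 (p.1 : Int) (p.2 : Int))
                        ((p.1 : Int) + pvDx.getD k 0) ((p.2 : Int) + pvDy.getD k 0)
                    · exact absurd hc hcg
                    · rfl
                  have hne0 := pv_dir_ne_zero k hk
                  have hqne : ((p.1 : Int) + pvDx.getD k 0, (p.2 : Int) + pvDy.getD k 0) ≠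
                      ((p.1 : Int), (p.2 : Int)) := by
                    intro he
                    apply hne0
                    have e1 := congrArg Prod.fst he
                    have e2 := congrArg Prod.snd he
                    simp only [] at e1 e2
                    have : pvDx.getD k 0 = 0 := by omega
                    have : pvDy.getD k 0 = 0 := by omega
                    simp_all
                  have hvq : pvCGet s.1 ((p.1 : Int) + pvDx.getD k 0)
                      ((p.2 : Int) + pvDy.getD k 0) = true := by
                    rw [← pv_cget_cset_ne hPs.1 hpx.1 hpy.1 hkx.1 hky.1 hqne]
                    exact hcgt
                  obtain ⟨k', hk', hdx', hdy'⟩ := pv_dir_sym k hk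
                  have e1 : (p.1 : Int) + pvDx.getD k 0 + pvDx.getD k' 0 = (p.1 : Int) := by
                    rw [hdx']; ring
                  have e2 : (p.2 : Int) + pvDy.getD k 0 + pvDy.getD k' 0 = (p.2 : Int) := by
                    rw [hdy']; ring
                  have hqa := hOs _ _ hkx hky hvq k' hk'
                    (by rw [e1]; exact hpx) (by rw [e2]; exact hpy)
                  rw [e1, e2] at hqa
                  exact fun hq => hqa (pv_qual_symm.1 hq)
              · have hne : (x, y) ≠ ((p.1 : Int), (p.2 : Int)) := by
                  intro he
                  exact hxy ⟨congrArg Prod.fst he, congrArg Prod.snd he⟩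
                have hvs : pvCGet s.1 x y = true := by
                  rw [← pv_cget_cset_ne hPs.1 hpx.1 hpy.1 hx.1 hy.1 hne]
                  exact hvis
                exact hOs x y hx hy hvs k hk hkx hky
            · -- the seed is now marked
              rw [hlf.1]
              exact pv_cget_cset_self hPs.1 hpx hpy
            · -- previously marked cells stay marked
              rw [hlf.1]
              exact pv_cget_cset_mono hPs.1 hpx hpy (Int.natCast_nonneg _)
                (Int.natCast_nonneg _) (hz rfl)
      · -- already visited: nothing changes
        have hvt : pvCGet s.1 (p.1 : Int) (p.2 : Int) = true := by
          cases hcg : pvCGet s.1 (p.1 : Int) (p.2 : Int)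
          · exact absurd hcg hv
          · rfl
        exact ⟨hPs, fun _ => hvt, fun z hz => hz⟩
    · -- the empty grid of marks satisfies the invariant
      intro _ x y hx hy hvis
      rw [pv_cget_c0] at hvis
      cases hvis

def pvEB (a : List (List Int)) (l r : Int) (n i j : Nat) (p : Nat × Nat) : Bool :=
  decide (p.1 < n ∧ p.2 < n ∧
    l ≤ |pvGet a (i : Int) (j : Int) - pvGet a (p.1 : Int) (p.2 : Int)| ∧
    |pvGet a (i : Int) (j : Int) - pvGet a (p.1 : Int) (p.2 : Int)| ≤ r)

theorem pv_edge_or (a : List (List Int)) (l r : Int) (n i j : Nat) (found : Bool)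
    (p : Nat × Nat) : pvEdgeStep a l r n i j found p = (found || pvEB a l r n i j p) := by
  unfold pvEdgeStep pvEB; split_ifs with h <;> simp [h]

theorem pv_bfs_alt_true (a : List (List Int)) (l r : Int) :
    bfs_alt a l r = true ↔ pvHasE a l r := by
  rw [pv_bfs_alt_flat]
  have hinner : (fun (found : Bool) (p : Nat × Nat) =>
      [(p.1, p.2 + 1), (p.1 + 1, p.2)].foldl (pvEdgeStep a l r a.length p.1 p.2) found) =
      (fun (found : Bool) (p : Nat × Nat) =>
        found || (pvEB a l r a.length p.1 p.2 (p.1, p.2 + 1) ||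
          pvEB a l r a.length p.1 p.2 (p.1 + 1, p.2))) := by
    funext found p
    simp [pv_edge_or, Bool.or_assoc]
  rw [hinner, pv_foldl_or_any, Bool.false_or, List.any_eq_true]
  constructor
  · -- a found edge gives a qualifying pair
    rintro ⟨p, hp, hor⟩
    obtain ⟨hi, hj⟩ := pv_mem_cells.1 hp
    simp only [pvEB, Bool.or_eq_true, decide_eq_true_eq] at hor
    rcases hor with ⟨h1, h2, h3, h4⟩ | ⟨h1, h2, h3, h4⟩
    · -- right neighbour: direction k = 0
      refine ⟨(p.1 : Int), (p.2 : Int), 0, by norm_num, ?_, ?_, ?_, ?_, ?_⟩ <;>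
        simp only [pvDx, pvDy, List.getD_cons_zero, pvInR, pvQual]
      · exact ⟨Int.natCast_nonneg _, by exact_mod_cast hi⟩
      · exact ⟨Int.natCast_nonneg _, by exact_mod_cast hj⟩
      · constructor <;> omega
      · constructor <;> omega
      · have e : ((p.2 + 1 : Nat) : Int) = (p.2 : Int) + 1 := by omega
        rw [← e, abs_sub_comm]
        constructor
        · simpa using h3
        · simpa using h4
    · -- down neighbour: direction k = 2
      refine ⟨(p.1 : Int), (p.2 : Int), 2, by norm_num, ?_, ?_, ?_, ?_, ?_⟩ <;>
        simp only [pvDx, pvDy, List.getD_cons_zero, List.getD_cons_succ, pvInR, pvQual]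
      · exact ⟨Int.natCast_nonneg _, by exact_mod_cast hi⟩
      · exact ⟨Int.natCast_nonneg _, by exact_mod_cast hj⟩
      · constructor <;> omega
      · constructor <;> omega
      · have e : ((p.1 + 1 : Nat) : Int) = (p.1 : Int) + 1 := by omega
        rw [← e, abs_sub_comm]
        constructor
        · simpa using h3
        · simpa using h4
  · -- a qualifying pair yields a right/down edge from one of its endpoints
    rintro ⟨x, y, k, hk, hx, hy, hkx, hky, hq⟩
    obtain ⟨hx1, hx2⟩ := hx
    obtain ⟨hy1, hy2⟩ := hy
    interval_cases k <;>
      simp only [pvDx, pvDy, List.getD_cons_zero, List.getD_cons_succ, pvQual, pvInR] at hq hkx hky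
    · -- k = 0 : right edge from (x, y)
      refine ⟨(x.toNat, y.toNat), pv_mem_cells.2 ⟨by omega, by omega⟩, ?_⟩
      simp only [pvEB, Bool.or_eq_true, decide_eq_true_eq]
      left
      have ex : ((x.toNat : Nat) : Int) = x := by omega
      have ey1 : ((y.toNat + 1 : Nat) : Int) = y + 1 := by omega
      have ey : ((y.toNat : Nat) : Int) = y := by omega
      refine ⟨by omega, by omega, ?_, ?_⟩ <;>
        · rw [ex, ey, ey1, abs_sub_comm]
          first
            | simpa using hq.1
            | simpa using hq.2
    · -- k = 1 : left edge, i.e. a right edge from (x, y-1)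
      refine ⟨(x.toNat, (y - 1).toNat), pv_mem_cells.2 ⟨by omega, by omega⟩, ?_⟩
      simp only [pvEB, Bool.or_eq_true, decide_eq_true_eq]
      left
      have ex : ((x.toNat : Nat) : Int) = x := by omega
      have ey1 : (((y - 1).toNat + 1 : Nat) : Int) = y := by omega
      have ey : (((y - 1).toNat : Nat) : Int) = y - 1 := by omega
      refine ⟨by omega, by omega, ?_, ?_⟩ <;>
        · rw [ex, ey, ey1]
          have e : y + -1 = y - 1 := by ring
          rw [e] at hq
          first
            | simpa [abs_sub_comm] using hq.1
            | simpa [abs_sub_comm] using hq.2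
    · -- k = 2 : down edge from (x, y)
      refine ⟨(x.toNat, y.toNat), pv_mem_cells.2 ⟨by omega, by omega⟩, ?_⟩
      simp only [pvEB, Bool.or_eq_true, decide_eq_true_eq]
      right
      have ex1 : ((x.toNat + 1 : Nat) : Int) = x + 1 := by omega
      have ex : ((x.toNat : Nat) : Int) = x := by omega
      have ey : ((y.toNat : Nat) : Int) = y := by omega
      refine ⟨by omega, by omega, ?_, ?_⟩ <;>
        · rw [ex, ey, ex1, abs_sub_comm]
          first
            | simpa using hq.1
            | simpa using hq.2
    · -- k = 3 : up edge, i.e. a down edge from (x-1, y)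
      refine ⟨((x - 1).toNat, y.toNat), pv_mem_cells.2 ⟨by omega, by omega⟩, ?_⟩
      simp only [pvEB, Bool.or_eq_true, decide_eq_true_eq]
      right
      have ey : ((y.toNat : Nat) : Int) = y := by omega
      have ex1 : (((x - 1).toNat + 1 : Nat) : Int) = x := by omega
      have ex : (((x - 1).toNat : Nat) : Int) = x - 1 := by omega
      refine ⟨by omega, by omega, ?_, ?_⟩ <;>
        · rw [ey, ex, ex1]
          have e : x + -1 = x - 1 := by ring
          rw [e] at hq
          first
            | simpa [abs_sub_comm] using hq.1
            | simpa [abs_sub_comm] using hq.2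

-- ===== VERDICT (by name: the statement is the Claim_ definition above) =====
theorem bfs_spec : Claim_equal_bfs := by
  intro a l r _ _
  unfold Spec_bfs
  cases hb : bfs_alt a l r with
  | true => exact (pv_bfs_true a l r).2 ((pv_bfs_alt_true a l r).1 hb)
  | false =>
    cases ha : bfs a l r with
    | false => rfl
    | true =>
      exact absurd ((pv_bfs_alt_true a l r).2 ((pv_bfs_true a l r).1 ha)) (by simp [hb])
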